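-- pv_equiv track=rewrite | github.com/Ironprop-Stone/SAT_Quality | utils/circuit_utils.py | get_picone_list
-- ===== SOURCE A (Python) =====
-- def get_picone_list(x_data, fanin_list, level_list):
--     picone_list = []
--     for idx in range(len(x_data)):
--         picone_list.append([])
--     for level in range(len(level_list)):
--         for idx in level_list[level]:
--             if x_data[idx][1] == 0:
--                 picone_list[idx] = [idx]
--             else:
--                 for fanin_idx in fanin_list[idx]:
--                     picone_list[idx] += picone_list[fanin_idx]
--                 picone_list[idx] = list(set(picone_list[idx]))
--                 picone_list[idx].sort()
--     return picone_list
-- ===== SOURCE B (Python) =====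
-- def _merge_unique(a, b):
--     # linear two-pointer merge of two strictly increasing lists, skipping duplicates
--     i, j, out = 0, 0, []
--     while i < len(a) and j < len(b):
--         if a[i] < b[j]:
--             out.append(a[i]); i += 1
--         elif b[j] < a[i]:
--             out.append(b[j]); j += 1
--         else:
--             out.append(a[i]); i += 1; j += 1
--     out.extend(a[i:])
--     out.extend(b[j:])
--     return out
--
--
-- def get_picone_list(x_data, fanin_list, level_list):
--     picone_list = [[] for _ in range(len(x_data))]
--     for level in level_list:
--         for idx in level:
--             if x_data[idx][1] == 0:
--                 picone_list[idx] = [idx]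
--             else:
--                 acc = picone_list[idx]
--                 for fanin_idx in fanin_list[idx]:
--                     acc = _merge_unique(acc, picone_list[fanin_idx])
--                 picone_list[idx] = acc
--     return picone_list
-- ===== Notes on version B (the rewrite author's own statement) =====
-- stated objective: alternative
-- what changed: B never builds a set and never sorts: it exploits the invariant that every stored cone is already strictly sorted and combines fanin cones with a linear two-pointer duplicate-skipping merge, accumulating into a local list, instead of A's concatenate-all / list(set(...)) / in-place .sort() per gate.
import Mathlib
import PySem

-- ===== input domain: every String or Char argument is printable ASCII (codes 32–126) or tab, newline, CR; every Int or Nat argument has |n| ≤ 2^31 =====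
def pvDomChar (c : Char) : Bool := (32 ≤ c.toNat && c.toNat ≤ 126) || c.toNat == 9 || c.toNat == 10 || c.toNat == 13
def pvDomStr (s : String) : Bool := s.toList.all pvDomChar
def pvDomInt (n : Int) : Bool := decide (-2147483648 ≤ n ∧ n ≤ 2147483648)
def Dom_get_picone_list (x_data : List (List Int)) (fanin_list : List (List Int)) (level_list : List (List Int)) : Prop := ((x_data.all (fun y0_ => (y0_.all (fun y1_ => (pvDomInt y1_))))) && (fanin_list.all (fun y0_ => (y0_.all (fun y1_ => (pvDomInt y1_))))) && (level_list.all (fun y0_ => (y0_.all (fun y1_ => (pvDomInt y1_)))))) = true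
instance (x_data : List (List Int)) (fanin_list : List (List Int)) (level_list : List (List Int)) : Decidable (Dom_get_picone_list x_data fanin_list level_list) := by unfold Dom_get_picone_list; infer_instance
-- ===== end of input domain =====

-- B replaces A's concatenate / list(set(...)) / sort per gate by linear two-pointer
-- duplicate-skipping merges of the already strictly sorted fanin cones (no set, no sort);
-- objective: alternative. Return value only — neither program mutates its arguments.

-- ===== PORT A =====
-- one loop body: 'for idx in level_list[level]: …' (list(set(x)).sort() = sorted distinct elements)
def picStepA (x_data : List (List Int)) (fanin_list : List (List Int))
    (pic : List (List Int)) (idx : Int) : List (List Int) :=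
  if PySem.List.pyGetD (PySem.List.pyGetD x_data idx []) 1 0 == 0 then
    PySem.List.pySetD pic idx [idx]
  else
    let pic' := (PySem.List.pyGetD fanin_list idx []).foldl
      (fun p fanin_idx =>
        PySem.List.pySetD p idx (PySem.List.pyGetD p idx [] ++ PySem.List.pyGetD p fanin_idx [])) pic
    PySem.List.pySetD pic' idx
      (PySem.List.sorted (PySem.Set.ofList (PySem.List.pyGetD pic' idx [])) (fun x => x) false)

def get_picone_list (x_data : List (List Int)) (fanin_list : List (List Int)) (level_list : List (List Int)) : List (List Int) :=
  let picone_list := (PySem.List.pyRange 0 (x_data.length : Int) 1).foldl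
    (fun acc _ => acc ++ [([] : List Int)]) []
  (PySem.List.pyRange 0 (level_list.length : Int) 1).foldl
    (fun pic level => (PySem.List.pyGetD level_list level []).foldl (picStepA x_data fanin_list) pic)
    picone_list

-- ===== PORT B =====
-- Source B's _merge_unique: the two-pointer while loop over (i, j) becomes the obvious structural
-- recursion consuming the two lists; branches in the same order, 'out.extend' = the base cases.
def mergeUnique : List Int → List Int → List Int
  | [], b => b
  | a, [] => a
  | x :: xs, y :: ys =>
    if x < y then x :: mergeUnique xs (y :: ys)
    else if y < x then y :: mergeUnique (x :: xs) ys
    else x :: mergeUnique xs ys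

-- one loop body of Source B: PI ↦ [idx]; gate ↦ fold _merge_unique over the fanin cones into acc
def picStepB (x_data : List (List Int)) (fanin_list : List (List Int))
    (pic : List (List Int)) (idx : Int) : List (List Int) :=
  if PySem.List.pyGetD (PySem.List.pyGetD x_data idx []) 1 0 == 0 then
    PySem.List.pySetD pic idx [idx]
  else
    let acc := (PySem.List.pyGetD fanin_list idx []).foldl
      (fun acc fanin_idx => mergeUnique acc (PySem.List.pyGetD pic fanin_idx []))
      (PySem.List.pyGetD pic idx [])
    PySem.List.pySetD pic idx acc

def get_picone_list_alt (x_data : List (List Int)) (fanin_list : List (List Int)) (level_list : List (List Int)) : List (List Int) :=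
  level_list.foldl
    (fun pic level => level.foldl (picStepB x_data fanin_list) pic)
    (List.replicate x_data.length ([] : List Int))

-- ===== PRECONDITION & SPEC =====
-- Pre_ is exactly the inputs where Python A returns normally: every listed node index is a valid
-- (possibly negative, Python-style) index into x_data, its x_data row has an entry [1], and for a
-- gate the index is also valid into fanin_list and all its fanins are valid indices into the cone
-- array (IndexError otherwise).
def Pre_get_picone_list (x_data : List (List Int)) (fanin_list : List (List Int)) (level_list : List (List Int)) : Prop :=
  ∀ level ∈ level_list, ∀ idx ∈ level,
    PySem.Raise.InRange x_data.length idx ∧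
    2 ≤ (PySem.List.pyGetD x_data idx []).length ∧
    (PySem.List.pyGetD (PySem.List.pyGetD x_data idx []) 1 0 ≠ 0 →
      PySem.Raise.InRange fanin_list.length idx ∧
      ∀ fanin_idx ∈ PySem.List.pyGetD fanin_list idx [],
        PySem.Raise.InRange x_data.length fanin_idx)
instance (x_data : List (List Int)) (fanin_list : List (List Int)) (level_list : List (List Int)) : Decidable (Pre_get_picone_list x_data fanin_list level_list) := by unfold Pre_get_picone_list; infer_instance

def pvWitness_get_picone_list : List (List Int) × List (List Int) × List (List Int) :=
  ([[0, 0], [0, 1], [0, 1]], [[], [0], [0, 1]], [[0], [1, 2]])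

def Spec_get_picone_list (x_data : List (List Int)) (fanin_list : List (List Int)) (level_list : List (List Int)) (out : List (List Int)) : Prop := out = get_picone_list_alt x_data fanin_list level_list
instance (x_data : List (List Int)) (fanin_list : List (List Int)) (level_list : List (List Int)) (out : List (List Int)) : Decidable (Spec_get_picone_list x_data fanin_list level_list out) := by unfold Spec_get_picone_list; infer_instance

-- ===== CLAIM (what is proved, stated in full; the proofs are below) =====
def Claim_equal_get_picone_list : Prop := ∀ (x_data : List (List Int)) (fanin_list : List (List Int)) (level_list : List (List Int)), Dom_get_picone_list x_data fanin_list level_list → Pre_get_picone_list x_data fanin_list level_list → Spec_get_picone_list x_data fanin_list level_list (get_picone_list x_data fanin_list level_list)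

-- ===== LEMMAS AND PROOFS =====

-- merge of two strictly increasing lists: strictly increasing, members = the union
theorem mergeUnique_spec (a b : List Int) (ha : a.Pairwise (· < ·)) (hb : b.Pairwise (· < ·)) :
    (mergeUnique a b).Pairwise (· < ·) ∧ ∀ x : Int, x ∈ mergeUnique a b ↔ x ∈ a ∨ x ∈ b := by
  induction a, b using mergeUnique.induct with
  | case1 b => simp [mergeUnique, hb]
  | case2 a h => cases a <;> simp_all [mergeUnique]
  | case3 x xs y ys hxy ih =>
    obtain ⟨ih1, ih2⟩ := ih (List.Pairwise.sublist (List.sublist_cons_self x xs) ha) hb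
    rw [mergeUnique]
    simp only [if_pos hxy]
    constructor
    · refine List.pairwise_cons.mpr ⟨fun z hz => ?_, ih1⟩
      rcases (ih2 z).mp hz with h | h
      · exact (List.pairwise_cons.mp ha).1 z h
      · rcases List.mem_cons.mp h with rfl | h
        · exact hxy
        · exact lt_trans hxy ((List.pairwise_cons.mp hb).1 z h)
    · intro z; simp [ih2 z, List.mem_cons]; tauto
  | case4 x xs y ys hxy hyx ih =>
    obtain ⟨ih1, ih2⟩ := ih ha (List.Pairwise.sublist (List.sublist_cons_self y ys) hb)
    rw [mergeUnique]
    simp only [if_neg hxy, if_pos hyx]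
    constructor
    · refine List.pairwise_cons.mpr ⟨fun z hz => ?_, ih1⟩
      rcases (ih2 z).mp hz with h | h
      · rcases List.mem_cons.mp h with rfl | h
        · exact hyx
        · exact lt_trans hyx ((List.pairwise_cons.mp ha).1 z h)
      · exact (List.pairwise_cons.mp hb).1 z h
    · intro z; simp [ih2 z, List.mem_cons]; tauto
  | case5 x xs y ys hxy hyx ih =>
    have hxy' : x = y := le_antisymm (not_lt.mp hyx) (not_lt.mp hxy)
    obtain ⟨ih1, ih2⟩ := ih (List.Pairwise.sublist (List.sublist_cons_self x xs) ha)
      (List.Pairwise.sublist (List.sublist_cons_self y ys) hb)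
    rw [mergeUnique]
    simp only [if_neg hxy, if_neg hyx]
    constructor
    · refine List.pairwise_cons.mpr ⟨fun z hz => ?_, ih1⟩
      rcases (ih2 z).mp hz with h | h
      · exact (List.pairwise_cons.mp ha).1 z h
      · exact hxy' ▸ (List.pairwise_cons.mp hb).1 z h
    · intro z
      simp only [List.mem_cons, ih2 z]
      subst hxy'; tauto

-- two strictly increasing Int lists with the same members are equal
theorem sorted_unique_eq (l1 l2 : List Int) (h1 : l1.Pairwise (· < ·)) (h2 : l2.Pairwise (· < ·))
    (hm : ∀ x, x ∈ l1 ↔ x ∈ l2) : l1 = l2 := by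
  exact ((List.perm_ext_iff_of_nodup h1.nodup h2.nodup).mpr hm).eq_of_pairwise
    (fun a b _ _ h h' => absurd h' (not_lt.mpr h.le)) h1 h2

-- the Nat position a Python index i addresses in a list of length n (valid when InRange n i)
def pvPos (n : Nat) (i : Int) : Nat := if 0 ≤ i then i.toNat else n - (-i).toNat

theorem pvPos_lt (n : Nat) (i : Int) (h : PySem.Raise.InRange n i) : pvPos n i < n := by
  rcases h with ⟨h1, h2⟩; unfold pvPos; split_ifs <;> omega

theorem pyIdx?_inrange (n : Nat) (i : Int) (h : PySem.Raise.InRange n i) :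
    PySem.List.pyIdx? n i = some (pvPos n i) := by
  rcases h with ⟨h1, h2⟩
  simp only [PySem.List.pyIdx?, pvPos]
  split_ifs <;> simp_all

theorem pyGetD_inrange {α : Type} (xs : List α) (i : Int) (d : α)
    (h : PySem.Raise.InRange xs.length i) :
    PySem.List.pyGetD xs i d = xs.getD (pvPos xs.length i) d := by
  simp [PySem.List.pyGetD, PySem.List.pyGet?, pyIdx?_inrange _ _ h, List.getD_eq_getElem?_getD]

theorem pySetD_inrange {α : Type} (xs : List α) (i : Int) (v : α)
    (h : PySem.Raise.InRange xs.length i) :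
    PySem.List.pySetD xs i v = xs.set (pvPos xs.length i) v := by
  simp [PySem.List.pySetD, PySem.List.pySet?, pyIdx?_inrange _ _ h]

theorem getD_set_self {α : Type} (xs : List α) (k : Nat) (v d : α) (hk : k < xs.length) :
    (xs.set k v).getD k d = v := by
  simp [List.getD_eq_getElem?_getD, hk]

theorem getD_set_ne {α : Type} (xs : List α) (k m : Nat) (v d : α) (h : m ≠ k) :
    (xs.set k v).getD m d = xs.getD m d := by
  simp [List.getD_eq_getElem?_getD, Ne.symm h]

-- state invariant tying A's whole array to B's: length n, every cell strictly sorted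
def PicInv (n : Nat) (pic : List (List Int)) : Prop :=
  pic.length = n ∧ ∀ k, k < n → (pic.getD k []).Pairwise (· < ·)

-- A's inner '+=' fold against B's running merge accumulator: the target cell of A's array holds
-- exactly the members of B's acc, other cells untouched, acc stays strictly sorted
theorem inner_inv (n : Nat) (pic : List (List Int)) (idx : Int)
    (hidx : PySem.Raise.InRange n idx) (hInv : PicInv n pic)
    (fs : List Int) (hfs : ∀ f ∈ fs, PySem.Raise.InRange n f)
    (p : List (List Int)) (acc : List Int)
    (hp : p.length = n)
    (hother : ∀ k, k ≠ pvPos n idx → p.getD k [] = pic.getD k [])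
    (hmem : ∀ x : Int, x ∈ p.getD (pvPos n idx) [] ↔ x ∈ acc)
    (hsub : ∀ x : Int, x ∈ pic.getD (pvPos n idx) [] → x ∈ acc)
    (hacc : acc.Pairwise (· < ·)) :
    let p' := fs.foldl (fun p fanin_idx =>
      PySem.List.pySetD p idx (PySem.List.pyGetD p idx [] ++ PySem.List.pyGetD p fanin_idx [])) p
    let acc' := fs.foldl (fun acc fanin_idx =>
      mergeUnique acc (PySem.List.pyGetD pic fanin_idx [])) acc
    p'.length = n ∧ (∀ k, k ≠ pvPos n idx → p'.getD k [] = pic.getD k []) ∧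
    (∀ x : Int, x ∈ p'.getD (pvPos n idx) [] ↔ x ∈ acc') ∧
    (∀ x : Int, x ∈ pic.getD (pvPos n idx) [] → x ∈ acc') ∧ acc'.Pairwise (· < ·) := by
  induction fs generalizing p acc with
  | nil => exact ⟨hp, hother, hmem, hsub, hacc⟩
  | cons f fs ih =>
    simp only [List.foldl_cons]
    have hf : PySem.Raise.InRange n f := hfs f (List.mem_cons_self ..)
    have hfs' : ∀ g ∈ fs, PySem.Raise.InRange n g := fun g hg => hfs g (List.mem_cons_of_mem _ hg)
    have hidx' : PySem.Raise.InRange p.length idx := hp ▸ hidx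
    have hf' : PySem.Raise.InRange p.length f := hp ▸ hf
    have hset : PySem.List.pySetD p idx (PySem.List.pyGetD p idx [] ++ PySem.List.pyGetD p f [])
        = p.set (pvPos n idx) (p.getD (pvPos n idx) [] ++ p.getD (pvPos n f) []) := by
      rw [pySetD_inrange _ _ _ hidx', pyGetD_inrange _ _ _ hidx', pyGetD_inrange _ _ _ hf', hp]
    rw [hset]
    have hBread : PySem.List.pyGetD pic f [] = pic.getD (pvPos n f) [] := by
      rw [pyGetD_inrange _ _ _ (hInv.1 ▸ hf), hInv.1]
    have hfcell : (pic.getD (pvPos n f) []).Pairwise (· < ·) := hInv.2 _ (pvPos_lt n f hf)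
    obtain ⟨hm1, hm2⟩ := mergeUnique_spec acc (pic.getD (pvPos n f) []) hacc hfcell
    set p1 := p.set (pvPos n idx) (p.getD (pvPos n idx) [] ++ p.getD (pvPos n f) []) with hp1
    set acc1 := mergeUnique acc (pic.getD (pvPos n f) []) with hacc1
    have c1 : p1.length = n := by simp [hp1, hp]
    have c2 : ∀ k, k ≠ pvPos n idx → p1.getD k [] = pic.getD k [] := by
      intro k hk
      rw [hp1, getD_set_ne _ _ _ _ _ hk]; exact hother k hk
    have c3 : ∀ x : Int, x ∈ p1.getD (pvPos n idx) [] ↔ x ∈ acc1 := by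
      intro x
      rw [hp1, getD_set_self _ _ _ _ (by rw [hp]; exact pvPos_lt n idx hidx)]
      by_cases hcase : pvPos n f = pvPos n idx
      · -- the fanin cell aliases the target cell: A reads its accumulated cell, B reads the
        -- original cell — both contribute nothing new to the member set
        rw [hcase]
        simp only [List.mem_append, hmem x, hm2 x, hcase]
        constructor
        · rintro (h | h) <;> exact Or.inl h
        · rintro (h | h); · exact Or.inl h
          · exact Or.inl (hsub x h)
      · have heq := hother _ hcase
        simp only [List.mem_append, hmem x, hm2 x, heq]
    have c4 : ∀ x : Int, x ∈ pic.getD (pvPos n idx) [] → x ∈ acc1 := by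
      intro x hx
      exact (hm2 x).mpr (Or.inl (hsub x hx))
    have := ih hfs' p1 acc1 c1 c2 c3 c4 hm1
    rw [hBread]
    exact this

-- one node step: the two steps produce the same array, and the invariant is preserved
theorem step_eq (x_data fanin_list : List (List Int)) (pic : List (List Int)) (idx : Int)
    (h1 : PySem.Raise.InRange x_data.length idx)
    (h3 : PySem.List.pyGetD (PySem.List.pyGetD x_data idx []) 1 0 ≠ 0 →
      PySem.Raise.InRange fanin_list.length idx ∧
      ∀ fanin_idx ∈ PySem.List.pyGetD fanin_list idx [],
        PySem.Raise.InRange x_data.length fanin_idx)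
    (hInv : PicInv x_data.length pic) :
    picStepA x_data fanin_list pic idx = picStepB x_data fanin_list pic idx ∧
    PicInv x_data.length (picStepA x_data fanin_list pic idx) := by
  set n := x_data.length with hn
  obtain ⟨hpl, hcell⟩ := hInv
  have hjlt : pvPos n idx < n := pvPos_lt n idx h1
  have hidxp : PySem.Raise.InRange pic.length idx := hpl ▸ h1
  unfold picStepA picStepB
  by_cases hpi : PySem.List.pyGetD (PySem.List.pyGetD x_data idx []) 1 0 == 0
  · simp only [hpi, if_true]
    refine ⟨by trivial, ?_⟩
    rw [pySetD_inrange _ _ _ hidxp, hpl]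
    refine ⟨by simp [hpl], fun k hk => ?_⟩
    by_cases hkj : k = pvPos n idx
    · subst hkj; rw [getD_set_self _ _ _ _ (hpl ▸ hjlt)]; simp
    · rw [getD_set_ne _ _ _ _ _ hkj]; exact hcell k hk
  · have hpiF : (PySem.List.pyGetD (PySem.List.pyGetD x_data idx []) 1 0 == 0) = false := by
      simpa using hpi
    simp only [hpiF, Bool.false_eq_true, if_false]
    have hpi' : PySem.List.pyGetD (PySem.List.pyGetD x_data idx []) 1 0 ≠ 0 := by
      simpa using hpi
    obtain ⟨hfr, hfall⟩ := h3 hpi'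
    have hB0 : PySem.List.pyGetD pic idx [] = pic.getD (pvPos n idx) [] := by
      rw [pyGetD_inrange _ _ _ hidxp, hpl]
    have hcellj : (pic.getD (pvPos n idx) []).Pairwise (· < ·) := hcell _ hjlt
    have hinner := inner_inv n pic idx h1 ⟨hpl, hcell⟩
      (PySem.List.pyGetD fanin_list idx []) hfall pic (pic.getD (pvPos n idx) [])
      hpl (fun _ _ => rfl) (hB0 ▸ fun x => Iff.rfl) (fun _ hx => hx) hcellj
    rw [hB0]
    set p' := (PySem.List.pyGetD fanin_list idx []).foldl (fun p fanin_idx =>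
      PySem.List.pySetD p idx (PySem.List.pyGetD p idx [] ++ PySem.List.pyGetD p fanin_idx [])) pic with hp'def
    set acc' := (PySem.List.pyGetD fanin_list idx []).foldl (fun acc fanin_idx =>
      mergeUnique acc (PySem.List.pyGetD pic fanin_idx [])) (pic.getD (pvPos n idx) []) with hacc'def
    obtain ⟨hp'len, hp'other, hp'mem, _, hacc'sorted⟩ := hinner
    have hidxp' : PySem.Raise.InRange p'.length idx := hp'len ▸ h1
    have hAcell : PySem.List.sorted (PySem.Set.ofList (PySem.List.pyGetD p' idx []))
        (fun x => x) false = acc' := by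
      apply sorted_unique_eq _ _ (PySem.List.sorted_ofList_pairwise_lt _) hacc'sorted
      intro x
      rw [PySem.List.mem_sorted, PySem.Set.mem_ofList, pyGetD_inrange _ _ _ hidxp', hp'len]
      exact hp'mem x
    rw [hAcell]
    refine ⟨?_, ?_⟩
    · -- same array: A writes acc' at idx into p', B writes acc' at idx into pic; the other
      -- cells of p' equal pic's, and the written cell hides the only differing one
      rw [pySetD_inrange _ _ _ hidxp', pySetD_inrange _ _ _ hidxp]
      simp only [hp'len, hpl]
      apply List.ext_getElem (by simp [hp'len, hpl])
      intro k hk1 hk2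
      have hkn : k < n := by simpa [hp'len] using hk1
      by_cases hkj : k = pvPos n idx
      · subst hkj
        rw [List.getElem_set_self, List.getElem_set_self]
      · rw [List.getElem_set_ne (by omega), List.getElem_set_ne (by omega)]
        have := hp'other k hkj
        rw [List.getD_eq_getElem _ _ (by omega), List.getD_eq_getElem _ _ (by omega)] at this
        exact this
    · rw [pySetD_inrange _ _ _ hidxp', hp'len]
      refine ⟨by simp [hp'len], fun k hk => ?_⟩
      by_cases hkj : k = pvPos n idx
      · subst hkj; rw [getD_set_self _ _ _ _ (hp'len ▸ hjlt)]; exact hacc'sorted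
      · rw [getD_set_ne _ _ _ _ _ hkj, hp'other k hkj]; exact hcell k hk

-- one level's inner loop: equal arrays, invariant preserved
theorem level_eq (x_data fanin_list : List (List Int)) (lvl : List Int)
    (hlvl : ∀ idx ∈ lvl,
      PySem.Raise.InRange x_data.length idx ∧
      2 ≤ (PySem.List.pyGetD x_data idx []).length ∧
      (PySem.List.pyGetD (PySem.List.pyGetD x_data idx []) 1 0 ≠ 0 →
        PySem.Raise.InRange fanin_list.length idx ∧
        ∀ fanin_idx ∈ PySem.List.pyGetD fanin_list idx [],
          PySem.Raise.InRange x_data.length fanin_idx))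
    (pic : List (List Int)) (hInv : PicInv x_data.length pic) :
    lvl.foldl (picStepA x_data fanin_list) pic = lvl.foldl (picStepB x_data fanin_list) pic ∧
    PicInv x_data.length (lvl.foldl (picStepA x_data fanin_list) pic) := by
  induction lvl generalizing pic with
  | nil => exact ⟨rfl, hInv⟩
  | cons i is ih =>
    simp only [List.foldl_cons]
    have hi := hlvl i (List.mem_cons_self ..)
    obtain ⟨heq, hInv'⟩ := step_eq x_data fanin_list pic i hi.1 hi.2.2 hInv
    obtain ⟨heq2, hInv''⟩ := ih (fun j hj => hlvl j (List.mem_cons_of_mem _ hj)) _ hInv'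
    exact ⟨by rw [heq2, heq], hInv''⟩

-- the whole two-level loop: both folds keep equal arrays and the invariant
theorem levels_eq (x_data fanin_list : List (List Int)) (lvls : List (List Int))
    (hpre : ∀ level ∈ lvls, ∀ idx ∈ level,
      PySem.Raise.InRange x_data.length idx ∧
      2 ≤ (PySem.List.pyGetD x_data idx []).length ∧
      (PySem.List.pyGetD (PySem.List.pyGetD x_data idx []) 1 0 ≠ 0 →
        PySem.Raise.InRange fanin_list.length idx ∧
        ∀ fanin_idx ∈ PySem.List.pyGetD fanin_list idx [],
          PySem.Raise.InRange x_data.length fanin_idx))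
    (pic : List (List Int)) (hInv : PicInv x_data.length pic) :
    lvls.foldl (fun pic level => level.foldl (picStepA x_data fanin_list) pic) pic
      = lvls.foldl (fun pic level => level.foldl (picStepB x_data fanin_list) pic) pic ∧
    PicInv x_data.length
      (lvls.foldl (fun pic level => level.foldl (picStepA x_data fanin_list) pic) pic) := by
  induction lvls generalizing pic with
  | nil => exact ⟨rfl, hInv⟩
  | cons lvl lvls ih =>
    simp only [List.foldl_cons]
    obtain ⟨heq, hInv'⟩ := level_eq x_data fanin_list lvl (hpre lvl (List.mem_cons_self ..)) pic hInv
    obtain ⟨heq2, hInv''⟩ := ih (fun l hl => hpre l (List.mem_cons_of_mem _ hl)) _ hInv'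
    exact ⟨by rw [heq2, heq], hInv''⟩

-- A's initialisation loop builds n empty lists
theorem init_eq (n : Nat) :
    (PySem.List.pyRange 0 (n : Int) 1).foldl (fun acc _ => acc ++ [([] : List Int)]) []
      = List.replicate n ([] : List Int) := by
  have h := PySem.List.foldl_append_singleton_eq_map
    (l := PySem.List.pyRange 0 (n : Int) 1) (f := fun _ => ([] : List Int)) (acc := [])
  rw [h]
  simp [List.map_const', PySem.List.length_pyRange_one]

-- ===== VERDICT (by name: the statement is the Claim_ definition above) =====
theorem get_picone_list_spec : Claim_equal_get_picone_list := by
  intro x_data fanin_list level_list _ hpre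
  unfold Spec_get_picone_list get_picone_list get_picone_list_alt
  set n := x_data.length with hn
  rw [init_eq n]
  rw [PySem.List.foldl_pyRange_zero_pyGetD' level_list []
    (fun pic level => level.foldl (picStepA x_data fanin_list) pic)
    (List.replicate n ([] : List Int))]
  have hInv0 : PicInv n (List.replicate n ([] : List Int)) := by
    refine ⟨List.length_replicate, fun k hk => ?_⟩
    simp [List.getD_eq_getElem?_getD, hk]
  exact (levels_eq x_data fanin_list level_list hpre _ hInv0).1
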